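-- pv_equiv track=rewrite | github.com/tomasvanagas/prime-research | experiments/algebraic/modular_forms.py | compute_tau_via_delta
-- ===== SOURCE A (Python) =====
-- import math
--
-- def compute_tau_via_delta(N):
--     """
--     Compute tau(1)..tau(N) using the product definition:
--     Delta(q) = q * prod_{n>=1} (1-q^n)^24 = sum_{n>=1} tau(n) q^n
--
--     We expand the product up to q^N.
--     """
--     # Start with coefficients of prod (1 - q^n)^24 up to q^(N-1)
--     # then shift by q to get Delta
--     coeffs = [0] * (N + 1)
--     coeffs[0] = 1  # constant term of the product
--
--     for n in range(1, N + 1):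
--         # Multiply current polynomial by (1 - q^n)^24
--         # Use the fact that (1-x)^24 = sum_{k=0}^{24} C(24,k)(-1)^k x^k
--         # So (1-q^n)^24 = sum_{k=0}^{24} C(24,k)(-1)^k q^{nk}
--         binom_coeffs = []
--         for k in range(25):
--             if n * k > N:
--                 break
--             binom_coeffs.append((n * k, int((-1)**k * math.comb(24, k))))
--
--         # Multiply in reverse order to avoid overwriting
--         for j in range(N, -1, -1):
--             if coeffs[j] == 0:
--                 continue
--             for (shift, bc) in binom_coeffs:
--                 if shift == 0:
--                     continue
--                 if j + shift <= N:
--                     coeffs[j + shift] += coeffs[j] * bc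
--
--     # Now coeffs[k] is the coefficient of q^k in prod(1-q^n)^24
--     # Delta(q) = q * prod = sum tau(n) q^n
--     # So tau(n) = coeffs[n-1]
--     tau = {}
--     for n in range(1, N + 1):
--         tau[n] = coeffs[n - 1]
--     return tau
-- ===== SOURCE B (Python) =====
-- def compute_tau_via_delta(N):
--     """tau(1..N) via Delta = q * E(q)^24: build the truncated Euler product
--     E = prod (1-q^n) once, then raise it to the 24th power by binary powering
--     (square-and-multiply) with truncated polynomial multiplication."""
--     # E = prod_{n=1}^{N} (1 - q^n) mod q^(N+1)
--     P = [0] * (N + 1)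
--     P[0] = 1
--     for n in range(1, N + 1):
--         P = [P[j] - (P[j - n] if j >= n else 0) for j in range(N + 1)]
--
--     def mul(a, b):
--         return [sum(a[i] * b[m - i] for i in range(m + 1)) for m in range(N + 1)]
--
--     T = mul(P, P)   # E^2
--     T = mul(T, P)   # E^3
--     T = mul(T, T)   # E^6
--     T = mul(T, T)   # E^12
--     T = mul(T, T)   # E^24
--     return {n: T[n - 1] for n in range(1, N + 1)}
-- ===== Notes on version B (the rewrite author's own statement) =====
-- stated objective: faster
-- what changed: Instead of multiplying the 25-term binomial expansion of (1-q^n)^24 into the series for every n (A), B builds the truncated Euler product prod(1-q^n) with one cheap linear pass per n and then raises it to the 24th power with five truncated polynomial multiplications (binary powering).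
import Mathlib
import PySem

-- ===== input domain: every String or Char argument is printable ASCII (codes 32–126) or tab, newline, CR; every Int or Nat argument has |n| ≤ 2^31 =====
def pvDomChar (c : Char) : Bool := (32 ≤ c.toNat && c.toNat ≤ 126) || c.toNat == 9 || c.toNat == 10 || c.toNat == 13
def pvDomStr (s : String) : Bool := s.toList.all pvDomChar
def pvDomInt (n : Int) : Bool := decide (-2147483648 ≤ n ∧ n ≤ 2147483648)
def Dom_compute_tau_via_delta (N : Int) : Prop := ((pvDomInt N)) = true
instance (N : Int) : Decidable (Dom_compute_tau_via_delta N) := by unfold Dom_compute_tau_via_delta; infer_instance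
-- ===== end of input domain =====

-- B replaces A's per-n multiplication by the 25-term binomial expansion of (1-q^n)^24 with
-- one linear pass per factor (1-q^n) followed by binary powering to the 24th power.

-- ===== PORT A =====
-- the `binom_coeffs` list: k = 0,1,… while k < 25, breaking as soon as n*k > N
def binomA (M n k : Nat) : List (Nat × Int) :=
  if k < 25 then
    if M < n * k then []
    else (n * k, (-1 : Int) ^ k * (Nat.choose 24 k : Int)) :: binomA M n (k + 1)
  else []
termination_by 25 - k

-- the inner `for (shift, bc) in binom_coeffs` loop at a fixed j
def innerA (M j : Nat) (bs : List (Nat × Int)) (c : List Int) : List Int :=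
  bs.foldl (fun c p =>
    if p.1 = 0 then c
    else if j + p.1 ≤ M then c.set (j + p.1) (c.getD (j + p.1) 0 + c.getD j 0 * p.2)
    else c) c

-- the body of `for j in range(N, -1, -1)` (with the `coeffs[j] == 0` skip)
def bodyA (M : Nat) (bs : List (Nat × Int)) (c : List Int) (j : Nat) : List Int :=
  if c.getD j 0 = 0 then c else innerA M j bs c

-- one iteration of `for n in range(1, N + 1)`: multiply in (1-q^n)^24
def stepA (M n : Nat) (c : List Int) : List Int :=
  ((List.range (M + 1)).reverse).foldl (bodyA M (binomA M n 0)) c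

def compute_tau_via_delta (N : Int) : List (Int × Int) :=
  let M := N.toNat
  let c0 := (List.replicate (M + 1) (0 : Int)).set 0 1
  let c := (List.range' 1 M).foldl (fun c n => stepA M n c) c0
  (List.range' 1 M).map (fun n => (Int.ofNat n, c.getD (n - 1) 0))

-- ===== PORT B =====
-- one pass of `P = [P[j] - (P[j-n] if j >= n else 0) for j in range(N+1)]`
def eulerStep (M n : Nat) (P : List Int) : List Int :=
  (List.range (M + 1)).map (fun j => P.getD j 0 - (if n ≤ j then P.getD (j - n) 0 else 0))

-- `mul(a, b)`: truncated polynomial multiplication, c[m] = sum_{i<=m} a[i]*b[m-i]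
def mulB (M : Nat) (a b : List Int) : List Int :=
  (List.range (M + 1)).map (fun m =>
    ((List.range (m + 1)).map (fun i => a.getD i 0 * b.getD (m - i) 0)).sum)

def compute_tau_via_delta_alt (N : Int) : List (Int × Int) :=
  let M := N.toNat
  let P0 := (List.replicate (M + 1) (0 : Int)).set 0 1
  let P := (List.range' 1 M).foldl (fun P n => eulerStep M n P) P0
  let T2 := mulB M P P
  let T3 := mulB M T2 P
  let T6 := mulB M T3 T3
  let T12 := mulB M T6 T6
  let T24 := mulB M T12 T12
  (List.range' 1 M).map (fun n => (Int.ofNat n, T24.getD (n - 1) 0))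

-- ===== PRECONDITION & SPEC =====
-- Python A raises IndexError for N < 0 ([0]*(N+1) is empty, then coeffs[0] = 1 fails); B does too.
def Pre_compute_tau_via_delta (N : Int) : Prop := 0 ≤ N
instance (N : Int) : Decidable (Pre_compute_tau_via_delta N) := by unfold Pre_compute_tau_via_delta; infer_instance

def pvWitness_compute_tau_via_delta : Int := 3

def Spec_compute_tau_via_delta (N : Int) (out : List (Int × Int)) : Prop := out = compute_tau_via_delta_alt N
instance (N : Int) (out : List (Int × Int)) : Decidable (Spec_compute_tau_via_delta N out) := by unfold Spec_compute_tau_via_delta; infer_instance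

-- ===== CLAIM (what is proved, stated in full; the proofs are below) =====
def Claim_equal_compute_tau_via_delta : Prop := ∀ (N : Int), Dom_compute_tau_via_delta N → Pre_compute_tau_via_delta N → Spec_compute_tau_via_delta N (compute_tau_via_delta N)

-- ===== LEMMAS AND PROOFS =====

-- the binomial coefficient of the k-th term of (1-x)^24
def ckA (k : Nat) : Int := (-1 : Int) ^ k * (Nat.choose 24 k : Int)

-- "the list c agrees with the power series f on all coefficients up to M"
def okC (M : Nat) (c : List Int) (f : PowerSeries Int) : Prop :=
  c.length = M + 1 ∧ ∀ i, i ≤ M → c.getD i 0 = PowerSeries.coeff i f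

lemma getD_set (c : List Int) (k : Nat) (v : Int) (i : Nat) :
    (c.set k v).getD i 0 = if i = k ∧ k < c.length then v else c.getD i 0 := by
  rcases Nat.lt_or_ge k c.length with hk | hk
  · by_cases h : i = k
    · subst h
      simp [List.getD_eq_getElem?_getD, hk]
    · have h2 : ¬ (k = i) := fun hh => h hh.symm
      simp [List.getD_eq_getElem?_getD, h, h2, hk]
  · have h2 : c.set k v = c := List.set_eq_of_length_le (by omega)
    rw [h2, if_neg (fun h => absurd h.2 (by omega))]


lemma length_innerA (M j : Nat) (bs : List (Nat × Int)) (c : List Int) :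
    (innerA M j bs c).length = c.length := by
  induction bs generalizing c with
  | nil => rfl
  | cons p bs ih =>
    show (innerA M j bs (if p.1 = 0 then c else if j + p.1 ≤ M then
      c.set (j + p.1) (c.getD (j + p.1) 0 + c.getD j 0 * p.2) else c)).length = _
    rw [ih]
    split_ifs <;> simp


lemma length_stepA (M n : Nat) (c : List Int) : (stepA M n c).length = c.length := by
  unfold stepA
  generalize (List.range (M + 1)).reverse = js
  induction js generalizing c with
  | nil => rfl
  | cons j js ih =>
    rw [List.foldl_cons, ih]
    unfold bodyA
    split_ifs with h
    · rfl
    · exact length_innerA _ _ _ _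


lemma sum_map_range (f : Nat → Int) (n : Nat) :
    ((List.range n).map f).sum = ∑ i ∈ Finset.range n, f i := by
  induction n with
  | zero => simp
  | succ n ih => simp [List.range_succ, Finset.sum_range_succ, ih]


lemma getD_map_range (f : Nat → Int) (n i : Nat) :
    (((List.range n).map f).getD i 0) = if i < n then f i else 0 := by
  by_cases h : i < n
  · simp [List.getD_eq_getElem?_getD, h]
  · have h2 : (List.map f (List.range n)).length ≤ i := by simpa using Nat.le_of_not_lt h
    simp [List.getD_eq_getElem?_getD, h]


def wsum (M : Nat) (bs : List (Nat × Int)) (j i : Nat) : Int :=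
  (bs.map (fun p => if p.1 ≠ 0 ∧ j + p.1 = i ∧ j + p.1 ≤ M then p.2 else 0)).sum

lemma innerA_getD (M j : Nat) (bs : List (Nat × Int)) (c : List Int)
    (hl : c.length = M + 1) (i : Nat) :
    (innerA M j bs c).getD i 0 = c.getD i 0 + c.getD j 0 * wsum M bs j i := by
    induction bs generalizing c with
  | nil => simp [innerA, wsum]
  | cons p bs ih =>
    obtain ⟨sft, b⟩ := p
    show (innerA M j bs (if sft = 0 then c else if j + sft ≤ M then
        c.set (j + sft) (c.getD (j + sft) 0 + c.getD j 0 * b) else c)).getD i 0 = _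
    have hws : wsum M ((sft, b) :: bs) j i
        = (if sft ≠ 0 ∧ j + sft = i ∧ j + sft ≤ M then b else 0) + wsum M bs j i := by
      simp [wsum]
    by_cases hs : sft = 0
    · rw [if_pos hs, ih c hl, hws, if_neg (by simp [hs])]
      ring
    · rw [if_neg hs]
      by_cases hle : j + sft ≤ M
      · rw [if_pos hle]
        have hl' : (c.set (j + sft) (c.getD (j + sft) 0 + c.getD j 0 * b)).length = M + 1 := by
          simpa using hl
        rw [ih _ hl', hws]
        have hj : (c.set (j + sft) (c.getD (j + sft) 0 + c.getD j 0 * b)).getD j 0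
            = c.getD j 0 := by
          rw [getD_set, if_neg]; rintro ⟨h1, _⟩; omega
        rw [hj, getD_set]
        by_cases hij : i = j + sft
        · rw [if_pos ⟨hij, by omega⟩, if_pos ⟨hs, hij.symm, hle⟩, hij]
          ring
        · rw [if_neg (by rintro ⟨h1, _⟩; exact hij h1),
            if_neg (by rintro ⟨_, h2, _⟩; exact hij h2.symm)]
          ring
      · rw [if_neg hle, ih c hl, hws, if_neg (by rintro ⟨_, _, h3⟩; exact hle h3)]
        ring

lemma wsum_binomA (M n j i : Nat) (hn : 1 ≤ n) (hi : i ≤ M) (k0 : Nat) :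
    wsum M (binomA M n k0) j i
      = ∑ k ∈ Finset.Ico k0 25, (if k ≠ 0 ∧ j + n * k = i then ckA k else 0) := by
  have H : ∀ (m k0 : Nat), 25 - k0 ≤ m → wsum M (binomA M n k0) j i
      = ∑ k ∈ Finset.Ico k0 25, (if k ≠ 0 ∧ j + n * k = i then ckA k else 0) := by
    intro m
    induction m with
    | zero =>
      intro k0 hk0
      rw [binomA, if_neg (by omega), Finset.Ico_eq_empty (by omega)]
      simp [wsum]
    | succ m ih =>
      intro k0 hk0
      by_cases h25 : k0 < 25
      · rw [binomA, if_pos h25]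
        by_cases hMk : M < n * k0
        · rw [if_pos hMk]
          rw [show wsum M [] j i = 0 by simp [wsum]]
          symm
          apply Finset.sum_eq_zero
          intro k hk
          rw [if_neg]
          rintro ⟨hk0', hjk⟩
          have h1 : n * k0 ≤ n * k := Nat.mul_le_mul_left n (Finset.mem_Ico.mp hk).1
          omega
        · rw [if_neg hMk]
          have hcons : wsum M ((n * k0, (-1 : Int) ^ k0 * (Nat.choose 24 k0 : Int))
                :: binomA M n (k0 + 1)) j i
              = (if n * k0 ≠ 0 ∧ j + n * k0 = i ∧ j + n * k0 ≤ M then ckA k0 else 0)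
                + wsum M (binomA M n (k0 + 1)) j i := by
            simp [wsum, ckA]
          rw [hcons, ih (k0 + 1) (by omega),
            Finset.sum_eq_sum_Ico_succ_bot h25
              (fun k => if k ≠ 0 ∧ j + n * k = i then ckA k else 0)]
          congr 1
          have hiff : (n * k0 ≠ 0 ∧ j + n * k0 = i ∧ j + n * k0 ≤ M)
              ↔ (k0 ≠ 0 ∧ j + n * k0 = i) := by
            constructor
            · rintro ⟨h1, h2, _⟩
              refine ⟨fun hk => h1 (by simp [hk]), h2⟩
            · rintro ⟨h1, h2⟩
              exact ⟨by positivity, h2, by omega⟩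
          rw [if_congr hiff rfl rfl]
      · rw [binomA, if_neg h25, Finset.Ico_eq_empty (by omega)]
        simp [wsum]
  exact H 25 k0 (by omega)

lemma bodyA_getD (M n j : Nat) (c : List Int) (hl : c.length = M + 1) (i : Nat) :
    (bodyA M (binomA M n 0) c j).getD i 0
      = c.getD i 0 + c.getD j 0 * wsum M (binomA M n 0) j i := by
  unfold bodyA
  split_ifs with h
  · rw [h, zero_mul, add_zero]
  · exact innerA_getD M j _ c hl i

lemma GA_getD (M n : Nat) (hn : 1 ≤ n) :
    ∀ (t : Nat) (c : List Int), c.length = M + 1 → ∀ i, i ≤ M →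
    (((List.range t).reverse).foldl (bodyA M (binomA M n 0)) c).getD i 0
      = c.getD i 0 + ∑ k ∈ Finset.Ico 1 25,
          (if n * k ≤ i ∧ i - n * k < t then ckA k * c.getD (i - n * k) 0 else 0) := by
  intro t
  induction t with
  | zero =>
    intro c hl i hi
    simp only [List.range_zero, List.reverse_nil, List.foldl_nil]
    rw [Finset.sum_eq_zero, add_zero]
    intro k hk
    rw [if_neg]
    rintro ⟨_, h2⟩
    omega
  | succ t ih =>
    intro c hl i hi
    have hrev : (List.range (t + 1)).reverse = t :: (List.range t).reverse := by
      rw [List.range_succ, List.reverse_append]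
      rfl
    rw [hrev, List.foldl_cons]
    set c' := bodyA M (binomA M n 0) c t with hc'
    have hl' : c'.length = M + 1 := by
      rw [hc']
      unfold bodyA
      split_ifs with h
      · exact hl
      · rw [length_innerA]; exact hl
    rw [ih c' hl' i hi]
    have hW0 : ∀ x, x ≤ M → x ≤ t → wsum M (binomA M n 0) t x = 0 := by
      intro x hxM hxt
      rw [wsum_binomA M n t x hn hxM 0]
      apply Finset.sum_eq_zero
      intro k hk
      rw [if_neg]
      rintro ⟨hk0, hjk⟩
      have h5 : 0 < n * k := Nat.mul_pos (by omega) (by omega)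
      omega
    have hterm : ∀ x, x ≤ M →
        c'.getD x 0 = c.getD x 0 + c.getD t 0 * wsum M (binomA M n 0) t x :=
      fun x _ => by rw [hc']; exact bodyA_getD M n t c hl x
    rw [hterm i hi]
    have hsum : ∑ k ∈ Finset.Ico 1 25,
          (if n * k ≤ i ∧ i - n * k < t then ckA k * c'.getD (i - n * k) 0 else 0)
        = ∑ k ∈ Finset.Ico 1 25,
          (if n * k ≤ i ∧ i - n * k < t then ckA k * c.getD (i - n * k) 0 else 0) := by
      apply Finset.sum_congr rfl
      intro k hk
      by_cases hcond : n * k ≤ i ∧ i - n * k < t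
      · rw [if_pos hcond, if_pos hcond, hterm (i - n * k) (by omega),
          hW0 (i - n * k) (by omega) (by omega), mul_zero, add_zero]
      · rw [if_neg hcond, if_neg hcond]
    rw [hsum, add_assoc]
    congr 1
    have hWi : c.getD t 0 * wsum M (binomA M n 0) t i
        = ∑ k ∈ Finset.Ico 1 25, (if t + n * k = i then ckA k * c.getD t 0 else 0) := by
      rw [wsum_binomA M n t i hn hi 0,
        Finset.sum_eq_sum_Ico_succ_bot (by omega : (0 : Nat) < 25), if_neg (by simp),
        zero_add, Finset.mul_sum]
      apply Finset.sum_congr rfl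
      intro k hk
      have hk1 : k ≠ 0 := by have := (Finset.mem_Ico.mp hk).1; omega
      by_cases h2 : t + n * k = i
      · rw [if_pos ⟨hk1, h2⟩, if_pos h2]; ring
      · rw [if_neg (by rintro ⟨_, hh⟩; exact h2 hh), if_neg h2, mul_zero]
    rw [hWi, ← Finset.sum_add_distrib]
    apply Finset.sum_congr rfl
    intro k hk
    by_cases h1 : t + n * k = i
    · have h5 : i - n * k = t := by omega
      rw [if_pos h1, if_neg (by rintro ⟨_, hb⟩; omega), if_pos ⟨by omega, by omega⟩, h5,
        add_zero]
    · by_cases h2 : n * k ≤ i ∧ i - n * k < t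
      · rw [if_neg h1, if_pos h2, if_pos ⟨h2.1, by omega⟩, zero_add]
      · rw [if_neg h1, if_neg h2, if_neg (by rintro ⟨ha, hb⟩; omega), add_zero]

lemma stepA_getD (M n : Nat) (hn : 1 ≤ n) (c : List Int) (hl : c.length = M + 1)
    (i : Nat) (hi : i ≤ M) :
    (stepA M n c).getD i 0
      = ∑ k ∈ Finset.range 25, (if n * k ≤ i then ckA k * c.getD (i - n * k) 0 else 0) := by
  unfold stepA
  rw [GA_getD M n hn (M + 1) c hl i hi,
    Finset.range_eq_Ico, Finset.sum_eq_sum_Ico_succ_bot (by omega : (0 : Nat) < 25),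
    show (if n * 0 ≤ i then ckA 0 * c.getD (i - n * 0) 0 else 0) = c.getD i 0 by
      simp [ckA]]
  congr 1
  apply Finset.sum_congr rfl
  intro k hk
  by_cases h : n * k ≤ i
  · rw [if_pos ⟨h, by omega⟩, if_pos h]
  · rw [if_neg (fun hc => h hc.1), if_neg h]

lemma coeff_mul_sub_pow (f : PowerSeries Int) (n i : Nat) :
    PowerSeries.coeff i (f * (1 - PowerSeries.X ^ n) ^ 24)
      = ∑ k ∈ Finset.range 25,
          (if n * k ≤ i then ckA k * PowerSeries.coeff (i - n * k) f else 0) := by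
  have h1 : (1 - PowerSeries.X ^ n : PowerSeries Int) ^ 24
      = ∑ k ∈ Finset.range 25, PowerSeries.C (ckA k) * PowerSeries.X ^ (n * k) := by
    rw [sub_eq_add_neg, add_comm, add_pow]
    apply Finset.sum_congr rfl
    intro k hk
    rw [one_pow, neg_pow, ← pow_mul]
    simp only [ckA, map_mul, map_pow, map_neg, map_one, map_natCast]
    ring
  rw [h1, Finset.mul_sum, map_sum]
  apply Finset.sum_congr rfl
  intro k hk
  rw [show f * (PowerSeries.C (ckA k) * PowerSeries.X ^ (n * k))
      = PowerSeries.C (ckA k) * (f * PowerSeries.X ^ (n * k)) by ring,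
    PowerSeries.coeff_C_mul, PowerSeries.coeff_mul_X_pow', mul_ite, mul_zero]

lemma stepA_ok (M n : Nat) (hn : 1 ≤ n) (c : List Int) (f : PowerSeries Int)
    (h : okC M c f) : okC M (stepA M n c) (f * (1 - PowerSeries.X ^ n) ^ 24) := by
  obtain ⟨hl, hco⟩ := h
  refine ⟨by rw [length_stepA]; exact hl, fun i hi => ?_⟩
  rw [stepA_getD M n hn c hl i hi, coeff_mul_sub_pow]
  apply Finset.sum_congr rfl
  intro k hk
  by_cases hc : n * k ≤ i
  · rw [if_pos hc, if_pos hc, hco (i - n * k) (by omega)]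
  · rw [if_neg hc, if_neg hc]

lemma eulerStep_ok (M n : Nat) (P : List Int) (f : PowerSeries Int)
    (h : okC M P f) : okC M (eulerStep M n P) (f * (1 - PowerSeries.X ^ n)) := by
  obtain ⟨hl, hco⟩ := h
  refine ⟨by simp [eulerStep], fun i hi => ?_⟩
  unfold eulerStep
  rw [getD_map_range _ _ _ , if_pos (by omega)]
  rw [mul_sub, mul_one, map_sub, PowerSeries.coeff_mul_X_pow']
  rw [hco i hi]
  by_cases hn : n ≤ i
  · rw [if_pos hn, if_pos hn, hco (i - n) (by omega)]
  · rw [if_neg hn, if_neg hn]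

lemma mulB_ok (M : Nat) (a b : List Int) (fa fb : PowerSeries Int)
    (ha : okC M a fa) (hb : okC M b fb) : okC M (mulB M a b) (fa * fb) := by
  obtain ⟨hla, hca⟩ := ha
  obtain ⟨hlb, hcb⟩ := hb
  refine ⟨by simp [mulB], fun m hm => ?_⟩
  unfold mulB
  rw [getD_map_range _ _ _, if_pos (by omega), sum_map_range,
    PowerSeries.coeff_mul, Finset.Nat.sum_antidiagonal_eq_sum_range_succ_mk]
  apply Finset.sum_congr rfl
  intro i hi
  have hi' : i ≤ m := by have := Finset.mem_range.mp hi; omega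
  rw [hca i (by omega), hcb (m - i) (by omega)]

lemma okC_of_eq (M : Nat) (c : List Int) (f g : PowerSeries Int)
    (h : okC M c f) (hfg : f = g) : okC M c g := hfg ▸ h

lemma okC_init (M : Nat) : okC M ((List.replicate (M + 1) (0 : Int)).set 0 1) 1 := by
  refine ⟨by simp, fun i hi => ?_⟩
  rw [getD_set, PowerSeries.coeff_one]
  by_cases h0 : i = 0
  · rw [if_pos ⟨h0, by simp⟩, if_pos h0]
  · rw [if_neg (by rintro ⟨h1, _⟩; exact h0 h1), if_neg h0]
    simp

lemma foldA_ok (M : Nat) (ns : List Nat) (hns : ∀ n ∈ ns, 1 ≤ n) :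
    ∀ (c : List Int) (f : PowerSeries Int), okC M c f →
    okC M (ns.foldl (fun c n => stepA M n c) c)
      (f * (ns.map (fun n => (1 - PowerSeries.X ^ n) ^ 24)).prod) := by
  induction ns with
  | nil =>
    intro c f h
    simpa using h
  | cons n ns ih =>
    intro c f h
    rw [List.foldl_cons, List.map_cons, List.prod_cons, ← mul_assoc]
    exact ih (fun x hx => hns x (List.mem_cons_of_mem n hx)) _ _
      (stepA_ok M n (hns n List.mem_cons_self) c f h)

lemma foldE_ok (M : Nat) (ns : List Nat) :
    ∀ (P : List Int) (f : PowerSeries Int), okC M P f →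
    okC M (ns.foldl (fun P n => eulerStep M n P) P)
      (f * (ns.map (fun n => (1 - PowerSeries.X ^ n))).prod) := by
  induction ns with
  | nil =>
    intro P f h
    simpa using h
  | cons n ns ih =>
    intro P f h
    rw [List.foldl_cons, List.map_cons, List.prod_cons, ← mul_assoc]
    exact ih _ _ (eulerStep_ok M n P f h)

lemma prod_map_pow24 (ns : List Nat) (g : Nat → PowerSeries Int) :
    (ns.map (fun n => g n ^ 24)).prod = ((ns.map g).prod) ^ 24 := by
  induction ns with
  | nil => simp
  | cons n ns ih => simp [ih, mul_pow]

-- ===== VERDICT (by name: the statement is the Claim_ definition above) =====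
theorem compute_tau_via_delta_spec : Claim_equal_compute_tau_via_delta := by
  intro N _ _
  unfold Spec_compute_tau_via_delta compute_tau_via_delta compute_tau_via_delta_alt
  dsimp only
  generalize N.toNat = M
  have hns : ∀ n ∈ List.range' 1 M, 1 ≤ n := by
    intro n hn
    exact (List.mem_range'_1.mp hn).1
  have h0 := okC_init M
  have hA := foldA_ok M (List.range' 1 M) hns _ _ h0
  have hQ := foldE_ok M (List.range' 1 M) _ _ h0
  rw [one_mul, prod_map_pow24] at hA
  rw [one_mul] at hQ
  set E : PowerSeries Int := (List.map (fun n => 1 - PowerSeries.X ^ n) (List.range' 1 M)).prod with hE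
  have h2 := mulB_ok M _ _ _ _ hQ hQ
  have h3 := mulB_ok M _ _ _ _ h2 hQ
  have h6 := mulB_ok M _ _ _ _ h3 h3
  have h12 := mulB_ok M _ _ _ _ h6 h6
  have h24 := mulB_ok M _ _ _ _ h12 h12
  have h24' := okC_of_eq _ _ _ _ h24 (show _ = E ^ 24 by ring)
  apply List.map_congr_left
  intro n hn
  have hb := List.mem_range'_1.mp hn
  have hidx : n - 1 ≤ M := by omega
  rw [hA.2 (n - 1) hidx, h24'.2 (n - 1) hidx]
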